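-- pv_equiv track=rewrite | github.com/Arman-Alam-8694/CODEFORCES | 1986-E-Beautiful-Array/code.py | solve
-- ===== SOURCE A (Python) =====
-- def solve(n,k,array):
--     minn=float("inf")
--     dictt={}
--     array.sort()
--     for i in array:
--         if i%k not in dictt:
--             dictt[i%k]=[]
--         dictt[i%k].append(i)
--     odd_count=0
--     for v in dictt.values():
--         if len(v)&1:
--             odd_count+=1
--     if odd_count>1 and n&1:
--         return -1
--     if odd_count and (not n&1):
--         return -1
--     score=0
--     for arr in dictt.values():
--
--         m=len(arr)
--         if m&1:
--             min_score=0
--             for i in range(1,m,2):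
--                 min_score+=(arr[i+1]-arr[i])//k
--             postscore=min_score
--             prescore=0
--
--             for i in range(1,m,2):
--                 postscore-=(arr[i+1]-arr[i])//k
--                 prescore+=(arr[i]-arr[i-1])//k
--
--                 min_score=min(postscore+prescore,min_score)
--             score+=min_score
--         else:
--             min_score=0
--             for i in range(0,m,2):
--                 min_score+=(arr[i+1]-arr[i])//k
--
--             score+=min_score
--     return score
-- ===== SOURCE B (Python) =====
-- def _cost(g, k):
--     # Two-state pair-or-skip DP over the sorted group g:
--     # dp0 = cost of fully pairing the prefix (valid when its length is even),
--     # dp1 = min cost of the prefix with exactly one element left unpaired.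
--     dp0 = dp1 = 0
--     for j in range(len(g)):
--         if j % 2:
--             dp0 += (g[j] - g[j - 1]) // k
--         elif j:
--             dp1 = min(dp1 + (g[j] - g[j - 1]) // k, dp0)
--     return dp1 if len(g) % 2 else dp0
--
--
-- def solve(n, k, array):
--     groups = {}
--     for x in sorted(array):
--         groups.setdefault(x % k, []).append(x)
--     if sum(len(g) % 2 for g in groups.values()) > n % 2:
--         return -1
--     return sum(_cost(g, k) for g in groups.values())
-- ===== Notes on version B (the rewrite author's own statement) =====
-- stated objective: alternative
-- what changed: Per group A enumerates skip positions twice (a seeding sum loop, then a rescan maintaining postscore/prescore accumulators and minimizing over candidates, with separate even/odd code paths); B instead runs a single uniform two-state pair-or-skip dynamic program (dp0 = cost of fully paired prefix, dp1 = best cost with one unpaired element) over each group in one pass, handles both parities by returning dp0 or dp1, and replaces A's two -1 branches by the single test odd_groups > n % 2.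
import Mathlib
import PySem

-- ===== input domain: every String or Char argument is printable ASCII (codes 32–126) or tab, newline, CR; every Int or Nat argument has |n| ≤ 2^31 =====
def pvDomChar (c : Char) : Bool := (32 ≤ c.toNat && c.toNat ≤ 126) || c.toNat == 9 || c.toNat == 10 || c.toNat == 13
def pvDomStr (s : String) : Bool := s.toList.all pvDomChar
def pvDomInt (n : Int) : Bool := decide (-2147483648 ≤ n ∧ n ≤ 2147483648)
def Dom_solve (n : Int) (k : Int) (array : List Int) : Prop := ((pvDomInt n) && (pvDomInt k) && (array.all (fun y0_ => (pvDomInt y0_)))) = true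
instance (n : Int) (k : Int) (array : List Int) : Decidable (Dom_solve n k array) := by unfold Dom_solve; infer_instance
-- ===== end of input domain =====

-- B replaces A's per-group skip-position enumeration (a seeding sum loop plus a rescan with
-- postscore/prescore accumulators, in separate even/odd code paths) by one uniform two-state
-- pair-or-skip dynamic program per group; same O(n log n) cost (objective: alternative).
-- A sorts its argument in place (array.sort()); the equivalence proved here is about the
-- return value only (B does not mutate its argument).

-- ===== PORT A =====
-- 'minn = float("inf")' in A is dead code (never read) and is omitted.
-- pyGetD with default 0 ports arr[i]/arr[i±1]: in A's loops every such index is in range.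
def solve (n : Int) (k : Int) (array : List Int) : Int :=
  let arr := PySem.List.sorted array (fun x => x) false
  let dictt : PySem.Dict Int (List Int) :=
    arr.foldl (fun d i =>
      let d := if !(d.contains (PySem.Int.mod i k)) then d.insert (PySem.Int.mod i k) [] else d
      d.modify (PySem.Int.mod i k) [] (fun v => v ++ [i])) PySem.Dict.empty
  let odd_count : Int :=
    dictt.values.foldl (fun c v => if PySem.Int.band (PySem.List.len v) 1 ≠ 0 then c + 1 else c) 0
  if odd_count > 1 ∧ PySem.Int.band n 1 ≠ 0 then -1
  else if odd_count ≠ 0 ∧ PySem.Int.band n 1 = 0 then -1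
  else
    dictt.values.foldl (fun score arr =>
      score +
        (let m := PySem.List.len arr
         if PySem.Int.band m 1 ≠ 0 then
           let min_score := (PySem.List.pyRange 1 m 2).foldl
             (fun ms i => ms + PySem.Int.floordiv (PySem.List.pyGetD arr (i+1) 0 - PySem.List.pyGetD arr i 0) k) 0
           ((PySem.List.pyRange 1 m 2).foldl
             (fun (st : Int × Int × Int) i =>
               (st.1 - PySem.Int.floordiv (PySem.List.pyGetD arr (i+1) 0 - PySem.List.pyGetD arr i 0) k,
                st.2.1 + PySem.Int.floordiv (PySem.List.pyGetD arr i 0 - PySem.List.pyGetD arr (i-1) 0) k,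
                min ((st.1 - PySem.Int.floordiv (PySem.List.pyGetD arr (i+1) 0 - PySem.List.pyGetD arr i 0) k) +
                     (st.2.1 + PySem.Int.floordiv (PySem.List.pyGetD arr i 0 - PySem.List.pyGetD arr (i-1) 0) k)) st.2.2))
             (min_score, 0, min_score)).2.2
         else
           (PySem.List.pyRange 0 m 2).foldl
             (fun ms i => ms + PySem.Int.floordiv (PySem.List.pyGetD arr (i+1) 0 - PySem.List.pyGetD arr i 0) k) 0)) 0

-- ===== PORT B =====
-- _cost from Source B: one pass over the group with state (dp0, dp1)
def solveAltCost (g : List Int) (k : Int) : Int :=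
  let st := (PySem.List.pyRange 0 (PySem.List.len g) 1).foldl
    (fun (st : Int × Int) (j : Int) =>
      if PySem.Int.mod j 2 ≠ 0 then
        (st.1 + PySem.Int.floordiv (PySem.List.pyGetD g j 0 - PySem.List.pyGetD g (j-1) 0) k, st.2)
      else if j ≠ 0 then
        (st.1, min (st.2 + PySem.Int.floordiv (PySem.List.pyGetD g j 0 - PySem.List.pyGetD g (j-1) 0) k) st.1)
      else st) (0, 0)
  if PySem.Int.mod (PySem.List.len g) 2 ≠ 0 then st.2 else st.1

def solve_alt (n : Int) (k : Int) (array : List Int) : Int :=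
  let groups : PySem.Dict Int (List Int) :=
    (PySem.List.sorted array (fun x => x) false).foldl (fun d x =>
      let d := if !(d.contains (PySem.Int.mod x k)) then d.insert (PySem.Int.mod x k) [] else d
      d.modify (PySem.Int.mod x k) [] (fun v => v ++ [x])) PySem.Dict.empty
  if (groups.values.map (fun g => PySem.Int.mod (PySem.List.len g) 2)).sum > PySem.Int.mod n 2 then -1
  else (groups.values.map (fun g => solveAltCost g k)).sum

-- ===== PRECONDITION & SPEC =====
-- Pre_ excludes only k = 0 on a nonempty array, where Python's 'x % k' raises ZeroDivisionError in both programs.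
def Pre_solve (n : Int) (k : Int) (array : List Int) : Prop := array = [] ∨ k ≠ 0
instance (n : Int) (k : Int) (array : List Int) : Decidable (Pre_solve n k array) := by unfold Pre_solve; infer_instance
def pvWitness_solve : Int × Int × List Int := (3, 2, [1, 3, 5])

def Spec_solve (n : Int) (k : Int) (array : List Int) (out : Int) : Prop := out = solve_alt n k array
instance (n : Int) (k : Int) (array : List Int) (out : Int) : Decidable (Spec_solve n k array out) := by unfold Spec_solve; infer_instance

-- ===== CLAIM (what is proved, stated in full; the proofs are below) =====
def Claim_equal_solve : Prop := ∀ (n : Int) (k : Int) (array : List Int), Dom_solve n k array → Pre_solve n k array → Spec_solve n k array (solve n k array)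

-- ===== LEMMAS AND PROOFS =====

-- partial sum of the first c values of f
def psum (f : Nat → Int) (c : Nat) : Int := ((List.range c).map f).sum

-- closed form of B's two-state DP value after 2t+1 processed elements
def Mdp (E O : Nat → Int) : Nat → Int
  | 0 => 0
  | t + 1 => min (Mdp E O t + O t) (psum E (t + 1))

theorem psum_succ (f : Nat → Int) (c : Nat) : psum f (c+1) = psum f c + f c := by
  simp [psum, List.range_succ]

-- distributing a constant offset out of a running minimum
theorem foldl_min_offset (x : Int) : ∀ (l : List Int) (a : Int),
    (l.map (fun y => x + y)).foldl min (x + a) = x + l.foldl min a := by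
  intro l
  induction l with
  | nil => intro a; simp
  | cons y t ih =>
      intro a
      simp only [List.map_cons, List.foldl_cons]
      rw [min_add_add_left, ih]

-- closed form of A's second per-group loop (state = (postscore, prescore, min_score))
theorem lemA (O E : Nat → Int) (c : Nat) : ∀ (a b m0 : Int),
    (List.range c).foldl (fun (st : Int × Int × Int) (t : Nat) =>
        (st.1 - O t, st.2.1 + E t, min ((st.1 - O t) + (st.2.1 + E t)) st.2.2)) (a, b, m0)
    = (a - psum O c, b + psum E c,
       ((List.range c).map (fun q => (a - psum O (q+1)) + (b + psum E (q+1)))).foldl min m0) := by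
  induction c with
  | zero => intro a b m0; simp [psum]
  | succ c ih =>
      intro a b m0
      rw [List.range_succ, List.foldl_append, List.map_append, List.foldl_append, ih]
      simp [psum_succ]
      constructor
      · ring
      · constructor
        · ring
        · rw [min_comm]
          congr 1 <;> ring

-- A's odd-group counter equals B's 0/1 sum
theorem odd_count_eq (vs : List (List Int)) :
    vs.foldl (fun c v => if PySem.Int.band (PySem.List.len v) 1 ≠ 0 then c + 1 else c) (0 : Int)
      = (vs.map (fun g => PySem.Int.mod (PySem.List.len g) 2)).sum := by
  rw [PySem.List.foldl_ite_add_one (fun v => PySem.Int.band (PySem.List.len v) 1 ≠ 0) vs 0, zero_add]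
  induction vs with
  | nil => simp
  | cons v t ih =>
      have hv : PySem.Int.mod (PySem.List.len v) 2
          = if PySem.Int.band (PySem.List.len v) 1 ≠ 0 then 1 else 0 := by
        rw [PySem.Int.band_one]
        have h2 : PySem.Int.mod (PySem.List.len v) 2 = ((v.length % 2 : Nat) : Int) := by
          rw [PySem.List.len_eq]; exact_mod_cast PySem.Int.mod_natCast v.length 2
        rw [h2]
        rcases Nat.even_or_odd v.length with he | hodd
        · have h0 : v.length % 2 = 0 := Nat.even_iff.mp he
          rw [h0]; norm_num
        · have h1 : v.length % 2 = 1 := Nat.odd_iff.mp hodd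
          rw [h1]; norm_num
      rw [List.countP_cons, Nat.cast_add, ih, List.map_cons, List.sum_cons, hv]
      simp [add_comm]

theorem foldl_min_offset0 (x : Int) (l : List Int) :
    (l.map (fun y => x + y)).foldl min x = x + l.foldl min 0 := by
  have h := foldl_min_offset x l 0
  rwa [add_zero] at h

theorem final_min (O E : Nat → Int) (c : Nat) :
    ((List.range c).map (fun q => psum O c - psum O (q+1) + psum E (q+1))).foldl min (psum O c)
      = psum O c + ((List.range c).map (fun q => psum E (q+1) - psum O (q+1))).foldl min 0 := by
  have h : ((List.range c).map (fun q => psum O c - psum O (q+1) + psum E (q+1)))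
      = ((List.range c).map (fun q => psum E (q+1) - psum O (q+1))).map (fun y => psum O c + y) := by
    rw [List.map_map]
    exact List.map_congr_left (fun q _ => by simp only [Function.comp_apply]; ring)
  rw [h, foldl_min_offset0]

-- Mdp equals the prefix-min formulation A reduces to
theorem Mdp_eq (E O : Nat → Int) (c : Nat) :
    Mdp E O c = psum O c + ((List.range c).map (fun q => psum E (q+1) - psum O (q+1))).foldl min 0 := by
  induction c with
  | zero => simp [Mdp, psum]
  | succ c ih =>
      rw [Mdp, ih, List.range_succ, List.map_append, List.foldl_append]
      simp only [List.map_cons, List.map_nil, List.foldl_cons, List.foldl_nil]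
      rw [show psum O (c+1) + min (((List.range c).map (fun q => psum E (q+1) - psum O (q+1))).foldl min 0) (psum E (c+1) - psum O (c+1))
            = min (psum O (c+1) + ((List.range c).map (fun q => psum E (q+1) - psum O (q+1))).foldl min 0) (psum O (c+1) + (psum E (c+1) - psum O (c+1)))
          from (min_add_add_left _ _ _).symm]
      congr 1
      · rw [psum_succ]; ring
      · ring

-- lemA instantiated at the pair-difference functions of g (beta-reduced statement so rw matches)
theorem lemA2 (g : List Int) (k : Int) (c : Nat) (a b m0 : Int) :
    (List.range c).foldl (fun (st : Int × Int × Int) (t : Nat) =>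
        (st.1 - PySem.Int.floordiv (PySem.List.pyGetD g (2*(t:Int)+2) 0 - PySem.List.pyGetD g (2*(t:Int)+1) 0) k,
         st.2.1 + PySem.Int.floordiv (PySem.List.pyGetD g (2*(t:Int)+1) 0 - PySem.List.pyGetD g (2*(t:Int)) 0) k,
         min ((st.1 - PySem.Int.floordiv (PySem.List.pyGetD g (2*(t:Int)+2) 0 - PySem.List.pyGetD g (2*(t:Int)+1) 0) k) +
              (st.2.1 + PySem.Int.floordiv (PySem.List.pyGetD g (2*(t:Int)+1) 0 - PySem.List.pyGetD g (2*(t:Int)) 0) k)) st.2.2)) (a, b, m0)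
    = (a - psum (fun t => PySem.Int.floordiv (PySem.List.pyGetD g (2*(t:Int)+2) 0 - PySem.List.pyGetD g (2*(t:Int)+1) 0) k) c,
       b + psum (fun t => PySem.Int.floordiv (PySem.List.pyGetD g (2*(t:Int)+1) 0 - PySem.List.pyGetD g (2*(t:Int)) 0) k) c,
       ((List.range c).map (fun q =>
         (a - psum (fun t => PySem.Int.floordiv (PySem.List.pyGetD g (2*(t:Int)+2) 0 - PySem.List.pyGetD g (2*(t:Int)+1) 0) k) (q+1)) +
         (b + psum (fun t => PySem.Int.floordiv (PySem.List.pyGetD g (2*(t:Int)+1) 0 - PySem.List.pyGetD g (2*(t:Int)) 0) k) (q+1)))).foldl min m0) :=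
  lemA _ _ c a b m0

-- Python's mod by the positive literal 2
theorem pymod_two (x : Int) : PySem.Int.mod x 2 = x % 2 :=
  PySem.Int.mod_eq_emod_of_pos (by norm_num)

-- closed form of B's DP fold after an odd number 2t+1 of steps
theorem lemDP (g : List Int) (k : Int) : ∀ (t : Nat),
    (List.range (2*t+1)).foldl (fun (st : Int × Int) (j : Nat) =>
      if PySem.Int.mod (j:Int) 2 ≠ 0 then
        (st.1 + PySem.Int.floordiv (PySem.List.pyGetD g (j:Int) 0 - PySem.List.pyGetD g ((j:Int)-1) 0) k, st.2)
      else if (j:Int) ≠ 0 then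
        (st.1, min (st.2 + PySem.Int.floordiv (PySem.List.pyGetD g (j:Int) 0 - PySem.List.pyGetD g ((j:Int)-1) 0) k) st.1)
      else st) (0, 0)
    = (psum (fun t => PySem.Int.floordiv (PySem.List.pyGetD g (2*(t:Int)+1) 0 - PySem.List.pyGetD g (2*(t:Int)) 0) k) t,
       Mdp (fun t => PySem.Int.floordiv (PySem.List.pyGetD g (2*(t:Int)+1) 0 - PySem.List.pyGetD g (2*(t:Int)) 0) k)
           (fun t => PySem.Int.floordiv (PySem.List.pyGetD g (2*(t:Int)+2) 0 - PySem.List.pyGetD g (2*(t:Int)+1) 0) k) t) := by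
  intro t
  induction t with
  | zero =>
      simp [Mdp, psum]
  | succ t ih =>
      rw [show 2*(t+1)+1 = (2*t+1) + 1 + 1 from by ring, List.range_succ, List.range_succ,
          List.foldl_append, List.foldl_append, ih]
      simp only [List.foldl_cons, List.foldl_nil]
      have hcast1 : ((2*t+1 : Nat) : Int) = 2*(t:Int)+1 := by push_cast; ring
      have hcast2 : ((2*t+1+1 : Nat) : Int) = 2*(t:Int)+2 := by push_cast; ring
      rw [hcast1, hcast2]
      have hm1 : PySem.Int.mod (2*(t:Int)+1) 2 = 1 := by rw [pymod_two]; omega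
      have hm2 : PySem.Int.mod (2*(t:Int)+2) 2 = 0 := by rw [pymod_two]; omega
      rw [hm1, hm2]
      have h1 : (2*(t:Int)+1) - 1 = 2*(t:Int) := by ring
      have h2 : (2*(t:Int)+2) - 1 = 2*(t:Int)+1 := by ring
      rw [h1, h2]
      split_ifs with hA hB hC <;> try (exfalso; omega)
      simp only [Mdp]
      rw [psum_succ]

-- after an even positive number 2t+2 of steps the pairing cost dp0 is complete
theorem lemDP2 (g : List Int) (k : Int) (t : Nat) :
    (List.range (2*t+2)).foldl (fun (st : Int × Int) (j : Nat) =>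
      if PySem.Int.mod (j:Int) 2 ≠ 0 then
        (st.1 + PySem.Int.floordiv (PySem.List.pyGetD g (j:Int) 0 - PySem.List.pyGetD g ((j:Int)-1) 0) k, st.2)
      else if (j:Int) ≠ 0 then
        (st.1, min (st.2 + PySem.Int.floordiv (PySem.List.pyGetD g (j:Int) 0 - PySem.List.pyGetD g ((j:Int)-1) 0) k) st.1)
      else st) (0, 0)
    = (psum (fun t => PySem.Int.floordiv (PySem.List.pyGetD g (2*(t:Int)+1) 0 - PySem.List.pyGetD g (2*(t:Int)) 0) k) (t+1),
       Mdp (fun t => PySem.Int.floordiv (PySem.List.pyGetD g (2*(t:Int)+1) 0 - PySem.List.pyGetD g (2*(t:Int)) 0) k)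
           (fun t => PySem.Int.floordiv (PySem.List.pyGetD g (2*(t:Int)+2) 0 - PySem.List.pyGetD g (2*(t:Int)+1) 0) k) t) := by
  rw [show 2*t+2 = (2*t+1) + 1 from by ring, List.range_succ, List.foldl_append, lemDP]
  simp only [List.foldl_cons, List.foldl_nil]
  have hcast1 : ((2*t+1 : Nat) : Int) = 2*(t:Int)+1 := by push_cast; ring
  rw [hcast1]
  have hm1 : PySem.Int.mod (2*(t:Int)+1) 2 = 1 := by rw [pymod_two]; omega
  rw [hm1]
  have h1 : (2*(t:Int)+1) - 1 = 2*(t:Int) := by ring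
  rw [h1]
  split_ifs with hA <;> try (exfalso; omega)
  rw [psum_succ]

-- per-group equality: A's inline group expression = B's _cost (the DP)
theorem cost_eq (k : Int) (g : List Int) :
    (let m := PySem.List.len g
     if PySem.Int.band m 1 ≠ 0 then
       let min_score := (PySem.List.pyRange 1 m 2).foldl
         (fun ms i => ms + PySem.Int.floordiv (PySem.List.pyGetD g (i+1) 0 - PySem.List.pyGetD g i 0) k) 0
       ((PySem.List.pyRange 1 m 2).foldl
         (fun (st : Int × Int × Int) i =>
           (st.1 - PySem.Int.floordiv (PySem.List.pyGetD g (i+1) 0 - PySem.List.pyGetD g i 0) k,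
            st.2.1 + PySem.Int.floordiv (PySem.List.pyGetD g i 0 - PySem.List.pyGetD g (i-1) 0) k,
            min ((st.1 - PySem.Int.floordiv (PySem.List.pyGetD g (i+1) 0 - PySem.List.pyGetD g i 0) k) +
                 (st.2.1 + PySem.Int.floordiv (PySem.List.pyGetD g i 0 - PySem.List.pyGetD g (i-1) 0) k)) st.2.2))
         (min_score, 0, min_score)).2.2
     else
       (PySem.List.pyRange 0 m 2).foldl
         (fun ms i => ms + PySem.Int.floordiv (PySem.List.pyGetD g (i+1) 0 - PySem.List.pyGetD g i 0) k) 0)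
    = solveAltCost g k := by
  simp only [solveAltCost, PySem.List.len_eq]
  rw [PySem.List.pyRange_one 0 (g.length : Int)]
  simp only [sub_zero, Int.toNat_natCast, List.foldl_map, zero_add]
  have hband : PySem.Int.band (g.length : Int) 1 = ((g.length % 2 : Nat) : Int) := by
    rw [PySem.Int.band_one]; exact_mod_cast PySem.Int.mod_natCast g.length 2
  have hmod : PySem.Int.mod (g.length : Int) 2 = ((g.length % 2 : Nat) : Int) := by
    exact_mod_cast PySem.Int.mod_natCast g.length 2
  rcases Nat.even_or_odd g.length with he | ho
  · -- even group: A's pair-sum loop = dp0 = psum E c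
    have h0 : g.length % 2 = 0 := Nat.even_iff.mp he
    rw [hband, hmod, h0, Nat.cast_zero]
    rw [if_neg (show ¬ ((0:Int) ≠ 0) from by norm_num), if_neg (show ¬ ((0:Int) ≠ 0) from by norm_num)]
    obtain ⟨c, hlen⟩ : ∃ c, g.length = 2*c := ⟨g.length / 2, by omega⟩
    rw [PySem.List.pyRange_of_pos 0 (g.length : Int) (by norm_num : (0:Int) < 2)]
    have hcnt : (if (0:Int) < (g.length:Int) then (((g.length:Int) - 0 + 2 - 1)/2).toNat else 0) = c := by
      rcases Nat.eq_zero_or_pos g.length with hz | hp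
      · simp [hz]; omega
      · rw [if_pos (by exact_mod_cast hp)]
        have e1 : ((g.length:Int) - 0 + 2 - 1) = ((g.length + 1 : Nat) : Int) := by push_cast; ring
        have e2 : (((g.length + 1 : Nat) : Int))/2 = (((g.length+1)/2 : Nat) : Int) := by exact_mod_cast rfl
        rw [e1, e2, Int.toNat_natCast]
        omega
    rw [hcnt, List.foldl_map, PySem.List.foldl_add, zero_add, hlen]
    rcases Nat.eq_zero_or_pos c with hc0 | hcp
    · simp [hc0]
    · obtain ⟨c', rfl⟩ : ∃ c', c = c' + 1 := ⟨c - 1, by omega⟩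
      rw [show 2*(c'+1) = 2*c'+2 from by ring, lemDP2]
      simp only [psum]
      refine congrArg List.sum (List.map_congr_left ?_)
      intro t _
      norm_num
  · -- odd group: A's prefix/postfix min = dp1 = Mdp
    have h1 : g.length % 2 = 1 := Nat.odd_iff.mp ho
    rw [hband, hmod, h1, Nat.cast_one]
    rw [if_pos (show (1:Int) ≠ 0 from by norm_num), if_pos (show (1:Int) ≠ 0 from by norm_num)]
    obtain ⟨c, hlen⟩ : ∃ c, g.length = 2*c+1 := ⟨g.length / 2, by omega⟩
    rw [PySem.List.pyRange_of_pos 1 (g.length : Int) (by norm_num : (0:Int) < 2)]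
    have hcntO : (if (1:Int) < (g.length:Int) then (((g.length:Int) - 1 + 2 - 1)/2).toNat else 0) = c := by
      rcases lt_or_ge g.length 2 with hs | hp
      · have hone : g.length = 1 := by omega
        rw [if_neg (by exact_mod_cast (by omega : ¬ (1:Int) < (g.length:Int)))]
        omega
      · rw [if_pos (by exact_mod_cast (by omega : 1 < g.length))]
        have e1 : ((g.length:Int) - 1 + 2 - 1) = ((g.length : Nat) : Int) := by ring
        have e2 : ((g.length : Nat) : Int)/2 = ((g.length/2 : Nat) : Int) := by exact_mod_cast rfl
        rw [e1, e2, Int.toNat_natCast]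
        omega
    rw [hcntO, List.foldl_map, List.foldl_map, PySem.List.foldl_add, zero_add]
    have e3 : ∀ t : Nat, (1:Int) + 2*(t:Int) = 2*(t:Int) + 1 := fun t => by ring
    have e4 : ∀ t : Nat, ((2:Int)*(t:Int) + 1) + 1 = 2*(t:Int) + 2 := fun t => by ring
    have e5 : ∀ t : Nat, ((2:Int)*(t:Int) + 1) - 1 = 2*(t:Int) := fun t => by ring
    simp only [e3, e4, e5]
    rw [lemA2]
    simp only [zero_add]
    rw [show (List.map (fun (y : Nat) => PySem.Int.floordiv (PySem.List.pyGetD g (2 * (y:Int) + 2) 0 - PySem.List.pyGetD g (2 * (y:Int) + 1) 0) k) (List.range c)).sum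
        = psum (fun (t : Nat) => PySem.Int.floordiv (PySem.List.pyGetD g (2 * (t:Int) + 2) 0 - PySem.List.pyGetD g (2 * (t:Int) + 1) 0) k) c from rfl]
    rw [final_min]
    rw [hlen, lemDP, Mdp_eq]

-- ===== VERDICT (by name: the statement is the Claim_ definition above) =====
theorem solve_spec : Claim_equal_solve := by
  intro n k array hdom hpre
  unfold Spec_solve
  simp only [solve, solve_alt]
  rw [odd_count_eq]
  set G := (PySem.List.sorted array (fun x => x) false).foldl
      (fun d x =>
        let d := if !(d.contains (PySem.Int.mod x k)) then d.insert (PySem.Int.mod x k) [] else d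
        d.modify (PySem.Int.mod x k) [] (fun v => v ++ [x]))
      (PySem.Dict.empty : PySem.Dict Int (List Int)) with hG
  set S := (G.values.map (fun g => PySem.Int.mod (PySem.List.len g) 2)).sum with hS
  have hSnn : 0 ≤ S := by
    rw [hS]
    apply List.sum_nonneg
    intro x hx
    rcases List.mem_map.mp hx with ⟨g, _, rfl⟩
    exact PySem.Int.mod_nonneg _ (by norm_num)
  have hScore : G.values.foldl (fun score arr =>
      score +
        (let m := PySem.List.len arr
         if PySem.Int.band m 1 ≠ 0 then
           let min_score := (PySem.List.pyRange 1 m 2).foldl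
             (fun ms i => ms + PySem.Int.floordiv (PySem.List.pyGetD arr (i+1) 0 - PySem.List.pyGetD arr i 0) k) 0
           ((PySem.List.pyRange 1 m 2).foldl
             (fun (st : Int × Int × Int) i =>
               (st.1 - PySem.Int.floordiv (PySem.List.pyGetD arr (i+1) 0 - PySem.List.pyGetD arr i 0) k,
                st.2.1 + PySem.Int.floordiv (PySem.List.pyGetD arr i 0 - PySem.List.pyGetD arr (i-1) 0) k,
                min ((st.1 - PySem.Int.floordiv (PySem.List.pyGetD arr (i+1) 0 - PySem.List.pyGetD arr i 0) k) +
                     (st.2.1 + PySem.Int.floordiv (PySem.List.pyGetD arr i 0 - PySem.List.pyGetD arr (i-1) 0) k)) st.2.2))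
             (min_score, 0, min_score)).2.2
         else
           (PySem.List.pyRange 0 m 2).foldl
             (fun ms i => ms + PySem.Int.floordiv (PySem.List.pyGetD arr (i+1) 0 - PySem.List.pyGetD arr i 0) k) 0)) 0
      = (G.values.map (fun g => solveAltCost g k)).sum := by
    rw [PySem.List.foldl_add, zero_add]
    exact congrArg List.sum (List.map_congr_left (fun a _ => cost_eq k a))
  rw [PySem.Int.band_one]
  rcases PySem.Int.mod_two_eq n with h | h
  · rw [h]
    by_cases h0 : S = 0
    · rw [if_neg (by simp), if_neg (by simp [h0]), if_neg (by omega)]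
      exact hScore
    · rw [if_neg (by simp), if_pos ⟨h0, rfl⟩, if_pos (by omega)]
  · rw [h]
    by_cases h1 : S > 1
    · rw [if_pos ⟨h1, by norm_num⟩, if_pos h1]
    · rw [if_neg (by tauto), if_neg (by norm_num), if_neg h1]
      exact hScore
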